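-- pv_equiv track=rewrite | github.com/MrBrantCode/unitest_baseline | mut_generate/mist_train_cf/cf_43787/solution.py | categorize_primes
-- ===== SOURCE A (Python) =====
-- def categorize_primes(range_start, range_end):
--     def is_prime(n):
--         if n <= 1:
--             return False
--         if n <= 3:
--             return True
--         if n % 2 == 0 or n % 3 == 0:
--             return False
--         i = 5
--         while i * i <= n:
--             if n % i == 0 or n % (i + 2) == 0:
--                 return False
--             i += 6
--         return True
--
--     single_digit_primes = []
--     multi_digit_primes = []
--     for num in range(range_start+1, range_end):
--         if is_prime(num):
--             if num < 10:
--                 single_digit_primes.append(num)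
--             else:
--                 multi_digit_primes.append(num)
--     return single_digit_primes, multi_digit_primes
-- ===== SOURCE B (Python) =====
-- def categorize_primes(range_start, range_end):
--     # Segmented sieve over the window (range_start, range_end): mark every n in the
--     # window that has a divisor d with 2 <= d and d*d <= n; unmarked numbers >= 2 are prime.
--     lo = max(range_start + 1, 2)
--     hi = range_end
--     marked = set()
--     d = 2
--     while d * d < hi:
--         first = max(d * d, ((lo + d - 1) // d) * d)
--         for m in range(first, hi, d):
--             marked.add(m)
--         d += 1
--     single_digit_primes = []
--     multi_digit_primes = []
--     for n in range(lo, hi):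
--         if n not in marked:
--             if n < 10:
--                 single_digit_primes.append(n)
--             else:
--                 multi_digit_primes.append(n)
--     return single_digit_primes, multi_digit_primes
-- ===== Notes on version B (the rewrite author's own statement) =====
-- stated objective: faster
-- what changed: A tests every number in the range individually with 6k±1 trial division; B runs one segmented sieve over the window (marking, for each d with d*d < range_end, its multiples m >= d*d that fall in the window) and then reads the unmarked numbers off in order.
import Mathlib
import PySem

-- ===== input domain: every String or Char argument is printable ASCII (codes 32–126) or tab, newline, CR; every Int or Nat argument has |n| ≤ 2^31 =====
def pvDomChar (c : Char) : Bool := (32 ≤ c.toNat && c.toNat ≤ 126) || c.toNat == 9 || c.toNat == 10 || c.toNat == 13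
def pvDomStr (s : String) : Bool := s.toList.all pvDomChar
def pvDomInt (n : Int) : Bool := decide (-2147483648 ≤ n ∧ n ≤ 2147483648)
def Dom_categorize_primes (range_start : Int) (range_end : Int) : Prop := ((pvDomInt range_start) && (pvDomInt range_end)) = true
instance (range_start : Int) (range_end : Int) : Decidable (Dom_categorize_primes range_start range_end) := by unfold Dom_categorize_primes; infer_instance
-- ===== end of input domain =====

-- B replaces A's per-number 6k±1 trial division by one segmented sieve over the window
-- (marking any multiple m ≥ d*d of each d with d*d < range_end); objective: faster.

-- ===== PORT A =====
-- the 'while i * i <= n' loop of A's nested is_prime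
def isPrimeLoop (n : Int) (i : Int) : Bool :=
  if _h : i * i ≤ n then
    if PySem.Int.mod n i == 0 || PySem.Int.mod n (i + 2) == 0 then false
    else isPrimeLoop n (i + 6)
  else true
termination_by (n + 6 - i).toNat
decreasing_by
  have hle : i ≤ n := by
    rcases (by omega : i ≤ 0 ∨ 0 < i) with h0 | h0
    · nlinarith [mul_self_nonneg i]
    · nlinarith
  omega

def is_prime (n : Int) : Bool :=
  if n ≤ 1 then false
  else if n ≤ 3 then true
  else if PySem.Int.mod n 2 == 0 || PySem.Int.mod n 3 == 0 then false
  else isPrimeLoop n 5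

def categorize_primes (range_start : Int) (range_end : Int) : List Int × List Int :=
  (PySem.List.pyRange (range_start + 1) range_end 1).foldl
    (fun acc num =>
      if is_prime num then
        if num < 10 then (acc.1 ++ [num], acc.2) else (acc.1, acc.2 ++ [num])
      else acc)
    ([], [])

-- ===== PORT B =====
-- outer 'while d * d < hi' loop of B: mark every multiple m of d with m ≥ d*d, lo ≤ m < hi
def sieveLoop (lo : Int) (hi : Int) (marked : PySem.Set Int) (d : Int) : PySem.Set Int :=
  if _h : d * d < hi then
    let first := max (d * d) (PySem.Int.floordiv (lo + d - 1) d * d)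
    sieveLoop lo hi ((PySem.List.pyRange first hi d).foldl PySem.Set.add marked) (d + 1)
  else marked
termination_by (hi - d).toNat
decreasing_by
  have hle : d < hi := by
    rcases (by omega : d ≤ 0 ∨ 0 < d) with h0 | h0
    · nlinarith [mul_self_nonneg d]
    · nlinarith
  omega

def categorize_primes_alt (range_start : Int) (range_end : Int) : List Int × List Int :=
  let lo := max (range_start + 1) 2
  let hi := range_end
  let marked := sieveLoop lo hi PySem.Set.empty 2
  (PySem.List.pyRange lo hi 1).foldl
    (fun acc n =>
      if !(PySem.Set.contains marked n) then
        if n < 10 then (acc.1 ++ [n], acc.2) else (acc.1, acc.2 ++ [n])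
      else acc)
    ([], [])

-- ===== PRECONDITION & SPEC =====
def Spec_categorize_primes (range_start : Int) (range_end : Int) (out : List Int × List Int) : Prop := out = categorize_primes_alt range_start range_end
instance (range_start : Int) (range_end : Int) (out : List Int × List Int) : Decidable (Spec_categorize_primes range_start range_end out) := by unfold Spec_categorize_primes; infer_instance

-- ===== CLAIM (what is proved, stated in full; the proofs are below) =====
def Claim_equal_categorize_primes : Prop := ∀ (range_start : Int) (range_end : Int), Dom_categorize_primes range_start range_end → Spec_categorize_primes range_start range_end (categorize_primes range_start range_end)

-- ===== LEMMAS AND PROOFS =====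

-- A's wheel loop tests exactly the divisors d with i ≤ d (≤ √n), given no smaller one divides n
theorem isPrimeLoop_iff (n : Int) (h2 : ¬ (2:Int) ∣ n) (h3 : ¬ (3:Int) ∣ n) :
    ∀ i : Int, 5 ≤ i → i % 6 = 5 →
    (∀ d : Int, 2 ≤ d → d < i → ¬ d ∣ n) →
    (isPrimeLoop n i = true ↔ ∀ d : Int, 2 ≤ d → d * d ≤ n → ¬ d ∣ n) := by
  suffices H : ∀ k : Nat, ∀ i : Int, (n + 6 - i).toNat = k → 5 ≤ i → i % 6 = 5 →
      (∀ d : Int, 2 ≤ d → d < i → ¬ d ∣ n) →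
      (isPrimeLoop n i = true ↔ ∀ d : Int, 2 ≤ d → d * d ≤ n → ¬ d ∣ n) by
    intro i h5 h6 hs
    exact H _ i rfl h5 h6 hs
  intro k
  induction k using Nat.strong_induction_on with
  | _ k ih =>
    intro i hk h5 h6 hsmall
    rw [isPrimeLoop]
    by_cases hg : i * i ≤ n
    · have hin : i ≤ n := by nlinarith
      have h25 : 25 ≤ n := by nlinarith
      rw [dif_pos hg]
      by_cases hdvd : i ∣ n ∨ (i + 2) ∣ n
      · rw [if_pos (by simpa [PySem.Int.mod_eq_zero_iff_dvd] using hdvd)]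
        refine iff_of_false (by simp) ?_
        intro hall
        obtain ⟨e, hei, hedvd⟩ : ∃ e, (e = i ∨ e = i + 2) ∧ e ∣ n := by
          rcases hdvd with h | h
          exacts [⟨i, Or.inl rfl, h⟩, ⟨i + 2, Or.inr rfl, h⟩]
        have he5 : 5 ≤ e := by rcases hei with rfl | rfl <;> omega
        by_cases hesq : e * e ≤ n
        · exact hall e (by omega) hesq hedvd
        · obtain ⟨c, hc⟩ := hedvd
          have hepos : (0:Int) < e := by omega
          have hcpos : (0:Int) < c := by nlinarith
          have hc2 : (2:Int) ≤ c := by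
            rcases (by omega : c = 1 ∨ 2 ≤ c) with rfl | h
            · exfalso; rcases hei with rfl | rfl <;> nlinarith
            · exact h
          have hce : c < e := by nlinarith
          have hcc : c * c ≤ n := by nlinarith
          exact hall c hc2 hcc ⟨e, by rw [hc]; ring⟩
      · rw [if_neg (by simpa [PySem.Int.mod_eq_zero_iff_dvd] using hdvd)]
        push Not at hdvd
        have hi2 : i * i > i := by nlinarith
        apply ih ((n + 6 - (i + 6)).toNat) (by omega) (i + 6) rfl (by omega) (by omega)
        intro d hd2 hdlt hddvd
        rcases (by omega : d < i ∨ d = i ∨ d = i + 1 ∨ d = i + 2 ∨ d = i + 3 ∨ d = i + 4 ∨ d = i + 5)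
          with h | h | h | h | h | h | h
        · exact hsmall d hd2 h hddvd
        · exact hdvd.1 (h ▸ hddvd)
        · exact h2 (dvd_trans (by omega : (2:Int) ∣ i + 1) (h ▸ hddvd))
        · exact hdvd.2 (h ▸ hddvd)
        · exact h2 (dvd_trans (by omega : (2:Int) ∣ i + 3) (h ▸ hddvd))
        · exact h3 (dvd_trans (by omega : (3:Int) ∣ i + 4) (h ▸ hddvd))
        · exact h2 (dvd_trans (by omega : (2:Int) ∣ i + 5) (h ▸ hddvd))
    · rw [dif_neg hg]
      simp only [true_iff]
      intro d hd2 hdd hddvd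
      have hdi : d < i := by
        by_contra hcon
        push Not at hcon
        have : i * i ≤ d * d := mul_le_mul hcon hcon (by omega) (by omega)
        omega
      exact hsmall d hd2 hdi hddvd

-- A's is_prime is "n ≥ 2 with no divisor d, 2 ≤ d, d*d ≤ n"
theorem is_prime_iff (n : Int) :
    is_prime n = true ↔ 2 ≤ n ∧ ∀ d : Int, 2 ≤ d → d * d ≤ n → ¬ d ∣ n := by
  unfold is_prime
  split_ifs with ha hb hc
  · refine iff_of_false (by simp) ?_
    rintro ⟨h, -⟩; omega
  · refine iff_of_true rfl ⟨by omega, ?_⟩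
    intro d hd2 hdd _
    nlinarith
  · refine iff_of_false (by simp) ?_
    have h23 : (2:Int) ∣ n ∨ (3:Int) ∣ n := by
      simpa [PySem.Int.mod_eq_zero_iff_dvd] using hc
    rintro ⟨h2n, hall⟩
    have h4 : 4 ≤ n := by omega
    by_cases h2d : (2:Int) ∣ n
    · exact hall 2 (by omega) (by omega) h2d
    · have h3d : (3:Int) ∣ n := by tauto
      have h9 : 9 ≤ n := by omega
      exact hall 3 (by omega) (by omega) h3d
  · have hnd : ¬ (2:Int) ∣ n ∧ ¬ (3:Int) ∣ n := by
      have := hc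
      push Not at this
      simpa [PySem.Int.mod_eq_zero_iff_dvd] using this
    have hmain := isPrimeLoop_iff n hnd.1 hnd.2 5 (by omega) (by omega) ?hsmall
    · rw [hmain]
      exact ⟨fun h => ⟨by omega, h⟩, fun h => h.2⟩
    case hsmall =>
      intro d hd2 hdlt hddvd
      rcases (by omega : d = 2 ∨ d = 3 ∨ d = 4) with rfl | rfl | rfl
      · exact hnd.1 hddvd
      · exact hnd.2 hddvd
      · exact hnd.1 (dvd_trans (by norm_num) hddvd)

-- what the sieve marks
theorem mem_sieveLoop (lo hi : Int) (x : Int) :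
    ∀ d : Int, 2 ≤ d → ∀ s : PySem.Set Int,
    (x ∈ sieveLoop lo hi s d ↔
      x ∈ s ∨ ∃ e : Int, d ≤ e ∧ e ∣ x ∧ e * e ≤ x ∧ lo ≤ x ∧ x < hi) := by
  suffices H : ∀ k : Nat, ∀ d : Int, (hi - d).toNat = k → 2 ≤ d → ∀ s : PySem.Set Int,
      (x ∈ sieveLoop lo hi s d ↔
        x ∈ s ∨ ∃ e : Int, d ≤ e ∧ e ∣ x ∧ e * e ≤ x ∧ lo ≤ x ∧ x < hi) by
    intro d hd2 s
    exact H _ d rfl hd2 s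
  intro k
  induction k using Nat.strong_induction_on with
  | _ k ih =>
    intro d hk hd2 s
    rw [sieveLoop]
    by_cases hg : d * d < hi
    · rw [dif_pos hg]
      have hdd : d < d * d := by nlinarith
      have hdpos : (0:Int) < d := by omega
      -- the first marked multiple
      set q : Int := PySem.Int.floordiv (lo + d - 1) d with hq
      set first : Int := max (d * d) (q * d) with hfirst
      have hdvd_first : d ∣ first := by
        rcases max_choice (d * d) (q * d) with h | h <;> rw [← hfirst] at h <;> rw [h]
        · exact dvd_mul_left d d
        · exact dvd_mul_left d q
      have hqlo : lo ≤ q * d ∧ q * d ≤ lo + d - 1 := by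
        have hmm := PySem.Int.floordiv_mul_add_mod (lo + d - 1) d
        rw [← hq] at hmm
        have h0 := PySem.Int.mod_nonneg (lo + d - 1) hdpos
        have h1 := PySem.Int.mod_lt (lo + d - 1) hdpos
        constructor <;> omega
      have hinner : ∀ m : Int, m ∈ PySem.List.pyRange first hi d ↔
          d ∣ m ∧ d * d ≤ m ∧ lo ≤ m ∧ m < hi := by
        intro m
        rw [PySem.List.mem_pyRange_iff_of_pos hdpos]
        constructor
        · rintro ⟨hfm, hmhi, hsub⟩
          have hdm : d ∣ m := by
            have := dvd_add hsub hdvd_first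
            simpa using this
          refine ⟨hdm, le_trans (le_max_left _ _) hfm, ?_, hmhi⟩
          calc lo ≤ q * d := hqlo.1
            _ ≤ first := le_max_right _ _
            _ ≤ m := hfm
        · rintro ⟨hdm, hddm, hlom, hmhi⟩
          have hqm : q * d ≤ m := by
            by_contra hcon
            push Not at hcon
            have hpos : 0 < q * d - m := by omega
            have := Int.le_of_dvd hpos (dvd_sub (dvd_mul_left d q) hdm)
            omega
          exact ⟨max_le hddm hqm, hmhi, dvd_sub hdm hdvd_first⟩
      have hupd : (PySem.List.pyRange first hi d).foldl PySem.Set.add s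
          = PySem.Set.update s (PySem.List.pyRange first hi d) := rfl
      have hrec := ih ((hi - (d + 1)).toNat) (by omega) (d + 1) rfl (by omega)
        ((PySem.List.pyRange first hi d).foldl PySem.Set.add s)
      rw [hrec, hupd, PySem.Set.mem_update, hinner x]
      constructor
      · rintro ((hs | hx) | ⟨e, he1, he⟩)
        · exact Or.inl hs
        · exact Or.inr ⟨d, le_refl d, hx.1, hx.2.1, hx.2.2.1, hx.2.2.2⟩
        · exact Or.inr ⟨e, by omega, he⟩
      · rintro (hs | ⟨e, he1, hedvd, hee, helo, hehi⟩)
        · exact Or.inl (Or.inl hs)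
        · rcases (by omega : e = d ∨ d + 1 ≤ e) with rfl | h
          · exact Or.inl (Or.inr ⟨hedvd, hee, helo, hehi⟩)
          · exact Or.inr ⟨e, h, hedvd, hee, helo, hehi⟩
    · rw [dif_neg hg]
      refine ⟨Or.inl, ?_⟩
      rintro (hs | ⟨e, hde, -, hee, -, hxhi⟩)
      · exact hs
      · exfalso
        have : d * d ≤ e * e := mul_le_mul hde hde (by omega) (by omega)
        omega

-- the common loop shape of both final passes
theorem fold_partition (p : Int → Bool) (xs : List Int) (s m : List Int) :
    xs.foldl
      (fun acc num =>
        if p num then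
          if num < 10 then (acc.1 ++ [num], acc.2) else (acc.1, acc.2 ++ [num])
        else acc)
      (s, m)
    = (s ++ xs.filter (fun num => p num && decide (num < 10)),
       m ++ xs.filter (fun num => p num && decide (¬ num < 10))) := by
  induction xs generalizing s m with
  | nil => simp
  | cons x xs ih =>
      by_cases hp : p x
      · by_cases hx : x < 10 <;> simp [hp, hx, ih, List.filter_cons]
      · simp [hp, ih]

-- for n in the window, A's primality test agrees with "unmarked by the sieve"
theorem key_point (lo hi : Int) (hlo : 2 ≤ lo) (n : Int)
    (hn : n ∈ PySem.List.pyRange lo hi 1) :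
    is_prime n = !(PySem.Set.contains (sieveLoop lo hi PySem.Set.empty 2) n) := by
  rw [PySem.List.mem_pyRange_one] at hn
  have hmem := mem_sieveLoop lo hi n 2 (by omega) PySem.Set.empty
  have hp := is_prime_iff n
  cases hb : PySem.Set.contains (sieveLoop lo hi PySem.Set.empty 2) n
  · have hnot : n ∉ sieveLoop lo hi PySem.Set.empty 2 := by
      intro hmm
      have hc := (PySem.Set.contains_iff _ _).mpr hmm
      rw [hb] at hc
      exact Bool.false_ne_true hc
    simp only [Bool.not_false]
    refine hp.mpr ⟨by omega, ?_⟩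
    intro dd hd2 hdd hdvd
    exact hnot (hmem.mpr (Or.inr ⟨dd, hd2, hdvd, hdd, hn.1, hn.2⟩))
  · have hmm : n ∈ sieveLoop lo hi PySem.Set.empty 2 := (PySem.Set.contains_iff _ _).mp hb
    rcases hmem.mp hmm with hemp | ⟨e, h2e, hedvd, hee, -, -⟩
    · exact absurd hemp (by simp [PySem.Set.empty])
    · simp only [Bool.not_true]
      cases hip : is_prime n
      · rfl
      · exact absurd hedvd (((hp.mp hip).2) e h2e hee)

-- numbers below 2 contribute nothing to A's filter, so A's range can start at lo = max(rs+1, 2)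
theorem filter_range_shift (rs re : Int) (p : Int → Bool)
    (hlow : ∀ n : Int, n < 2 → p n = false) :
    (PySem.List.pyRange (rs + 1) re 1).filter p
      = (PySem.List.pyRange (max (rs + 1) 2) re 1).filter p := by
  by_cases h2 : 2 ≤ rs + 1
  · rw [max_eq_left h2]
  · have hmax : max (rs + 1) 2 = 2 := max_eq_right (by omega)
    rw [hmax]
    by_cases hre : re ≤ rs + 1
    · rw [PySem.List.pyRange_one_eq_nil hre, PySem.List.pyRange_one_eq_nil (by omega)]
    · by_cases hre2 : re ≤ 2
      · rw [PySem.List.pyRange_one_eq_nil (by omega : re ≤ (2:Int))]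
        simp only [List.filter_nil]
        rw [List.filter_eq_nil_iff]
        intro a ha
        rw [PySem.List.mem_pyRange_one] at ha
        simp [hlow a (by omega)]
      · rw [PySem.List.pyRange_one_append (rs + 1) 2 re (by omega) (by omega),
          List.filter_append]
        have hnil : (PySem.List.pyRange (rs + 1) 2 1).filter p = [] := by
          rw [List.filter_eq_nil_iff]
          intro a ha
          rw [PySem.List.mem_pyRange_one] at ha
          simp [hlow a (by omega)]
        rw [hnil, List.nil_append]

-- ===== VERDICT (by name: the statement is the Claim_ definition above) =====
theorem categorize_primes_spec : Claim_equal_categorize_primes := by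
  intro rs re _
  show categorize_primes rs re = categorize_primes_alt rs re
  simp only [categorize_primes, categorize_primes_alt]
  rw [fold_partition, fold_partition]
  have hkey : ∀ n ∈ PySem.List.pyRange (max (rs + 1) 2) re 1,
      is_prime n = !(PySem.Set.contains (sieveLoop (max (rs + 1) 2) re PySem.Set.empty 2) n) :=
    fun n hn => key_point (max (rs + 1) 2) re (le_max_right _ _) n hn
  have hlowf : ∀ q : Int → Bool, ∀ n : Int, n < 2 → (is_prime n && q n) = false := by
    intro q n hn
    have hf : is_prime n = false := by
      cases h : is_prime n
      · rfl
      · have := ((is_prime_iff n).mp h).1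
        omega
    simp [hf]
  have h1 : ∀ q : Int → Bool,
      (PySem.List.pyRange (rs + 1) re 1).filter (fun num => is_prime num && q num)
        = (PySem.List.pyRange (max (rs + 1) 2) re 1).filter
            (fun n => !(PySem.Set.contains (sieveLoop (max (rs + 1) 2) re PySem.Set.empty 2) n) && q n) := by
    intro q
    rw [filter_range_shift rs re _ (hlowf q)]
    exact List.filter_congr (fun x hx => by rw [hkey x hx])
  rw [h1 (fun num => decide (num < 10)), h1 (fun num => decide (¬ num < 10))]
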